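-- pv_equiv track=rewrite | github.com/AugustDanell/Kattis-Assignments | Python/4Thought.py | tryAllFours
-- ===== SOURCE A (Python) =====
-- def expressionParsing(s):
--     l = s.split()
--     operations = []
--     operands = []
--     for element in l:
--         if element in ["+", "-", "*", "/"]:
--             operations.append(element)
--         else:
--             operands.append(int(element))
--
--     # Level one.
--     index = 0
--     while index < len(operations):
--         if operations[index] == "*":
--             operands[index] = operands[index] * operands[index +1]
--             operands.pop(index+1)
--             operations.pop(index)
--         elif operations[index] == "/":
--             operands[index] = operands[index] // operands[index +1]
--             operands.pop(index+1)
--             operations.pop(index)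
--         else:
--             index += 1
--
--     # Level Two:
--     while len(operations) > 0:
--         operation = operations.pop(0)
--         if operation == "+":
--             operands[0] = operands[0] + operands[1]
--         elif operation == "-":
--             operands[0] = operands[0] - operands[1]
--
--         operands.pop(1)
--
--     return int(operands[0])
--
-- def tryAllFours(sumToFind):
--     mathematicalOperations = ["+", "-", "*", "/"]
--     for firstOperation in mathematicalOperations:
--         for secondOperation in mathematicalOperations:
--             for thirdOperation in mathematicalOperations:
--                 inString = "4 {0} 4 {1} 4 {2} 4".format(firstOperation, secondOperation, thirdOperation)
--                 ans = expressionParsing(inString)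
--
--                 if sumToFind == ans:
--                     return inString
--     return None
-- ===== SOURCE B (Python) =====
-- def _value(a, b, c):
--     # Evaluate 4 a 4 b 4 c 4 with Python precedence (* and // first, left-to-right),
--     # keeping a running total plus the current signed term (sign, magnitude).
--     total, sign, mag = 0, 1, 4
--     for op in (a, b, c):
--         if op == "*":
--             mag *= 4
--         elif op == "/":
--             mag //= 4
--         else:
--             total += sign * mag
--             sign = 1 if op == "+" else -1
--             mag = 4
--     return total + sign * mag
--
--
-- def _build_table():
--     ops = ["+", "-", "*", "/"]
--     table = {}
--     for a in ops:
--         for b in ops: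
--             for c in ops:
--                 v = _value(a, b, c)
--                 if v not in table:
--                     table[v] = "4 {} 4 {} 4 {} 4".format(a, b, c)
--     return table
--
--
-- _TABLE = _build_table()
--
--
-- def tryAllFours(sumToFind):
--     return _TABLE.get(sumToFind)
-- ===== Notes on version B (the rewrite author's own statement) =====
-- stated objective: simpler
-- what changed: A formats each operator triple into a string, re-parses and evaluates it with a two-level list-mutation parser, and scans until the target matches; B computes each triple's value directly with a one-pass signed-term evaluator (no string parsing), builds the full value-to-expression table once at module load (first triple wins), and answers queries by a single dict lookup.
import Mathlib
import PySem

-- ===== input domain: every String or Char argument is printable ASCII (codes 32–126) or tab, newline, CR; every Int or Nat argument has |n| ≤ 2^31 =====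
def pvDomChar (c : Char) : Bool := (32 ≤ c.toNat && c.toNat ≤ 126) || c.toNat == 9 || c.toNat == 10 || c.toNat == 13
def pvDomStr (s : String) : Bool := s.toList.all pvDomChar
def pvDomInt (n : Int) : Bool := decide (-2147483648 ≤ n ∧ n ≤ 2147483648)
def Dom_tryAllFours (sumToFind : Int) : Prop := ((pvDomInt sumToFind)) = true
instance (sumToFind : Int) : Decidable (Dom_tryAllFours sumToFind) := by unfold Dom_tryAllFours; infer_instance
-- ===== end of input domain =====

-- B replaces A's scan-until-match over parsed expression strings by a one-pass arithmetic
-- evaluator plus a build-full-table-once-then-lookup (dict keyed by value, first combo wins): simpler.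

-- ===== PORT A =====

-- level one of expressionParsing: the while loop collapsing '*' and '/' in place.
-- fuel only makes the recursion structural; fuel = operations.length suffices since
-- each iteration decreases operations.length - index by at least one.
-- operand reads use getD 0: on every string expressionParsing is called on,
-- the indices are in range (operands always has one element more than operations).
def epLevelOne : Nat → Nat → List Int → List String → List Int × List String
  | 0, _, operands, operations => (operands, operations)
  | fuel + 1, index, operands, operations =>
    if index < operations.length then
      if operations.getD index "" = "*" then
        epLevelOne fuel index
          ((operands.set index (operands.getD index 0 * operands.getD (index + 1) 0)).eraseIdx (index + 1))
          (operations.eraseIdx index)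
      else if operations.getD index "" = "/" then
        epLevelOne fuel index
          ((operands.set index (PySem.Int.floordiv (operands.getD index 0) (operands.getD (index + 1) 0))).eraseIdx (index + 1))
          (operations.eraseIdx index)
      else epLevelOne fuel (index + 1) operands operations
    else (operands, operations)

-- level two: while len(operations) > 0: pop the first operation, combine operands[0], operands[1].
def epLevelTwo : List Int → List String → List Int
  | operands, [] => operands
  | operands, operation :: rest =>
    let operands :=
      if operation = "+" then operands.set 0 (operands.getD 0 0 + operands.getD 1 0)
      else if operation = "-" then operands.set 0 (operands.getD 0 0 - operands.getD 1 0)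
      else operands
    epLevelTwo (operands.eraseIdx 1) rest

-- int(element): ofStr? is none only on non-integer tokens, which expressionParsing is never
-- given by tryAllFours (its tokens are "4" and operators); the getD 0 default is unreached there.
def expressionParsing (s : String) : Int :=
  let l := PySem.Str.split₀ s
  let p := l.foldl
    (fun (acc : List String × List Int) element =>
      if element ∈ ["+", "-", "*", "/"] then (acc.1 ++ [element], acc.2)
      else (acc.1, acc.2 ++ [(PySem.Int.ofStr? element).getD 0]))
    ([], [])
  let r := epLevelOne p.1.length 0 p.2 p.1
  let operands := epLevelTwo r.1 r.2
  operands.getD 0 0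

-- the triple nested for-loop with early return = findSome? over the same lists, in order.
def tryAllFours (sumToFind : Int) : Option String :=
  let mathematicalOperations := ["+", "-", "*", "/"]
  mathematicalOperations.findSome? fun firstOperation =>
    mathematicalOperations.findSome? fun secondOperation =>
      mathematicalOperations.findSome? fun thirdOperation =>
        let inString := "4 " ++ firstOperation ++ " 4 " ++ secondOperation ++ " 4 " ++ thirdOperation ++ " 4"
        let ans := expressionParsing inString
        if sumToFind = ans then some inString else none

-- ===== PORT B =====

-- B's evaluator: running total plus current signed term (sign, magnitude); no strings parsed.
def pvValue (a b c : String) : Int :=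
  let st := [a, b, c].foldl
    (fun (st : Int × Int × Int) op =>
      if op = "*" then (st.1, st.2.1, st.2.2 * 4)
      else if op = "/" then (st.1, st.2.1, PySem.Int.floordiv st.2.2 4)
      else (st.1 + st.2.1 * st.2.2, if op = "+" then 1 else -1, 4))
    (0, 1, 4)
  st.1 + st.2.1 * st.2.2

-- the full value → expression table, built once (first-occurring combo wins), as in Source B's _TABLE.
def pvTable : PySem.Dict Int String :=
  let ops := ["+", "-", "*", "/"]
  ops.foldl (fun t a => ops.foldl (fun t b => ops.foldl (fun t c =>
      let v := pvValue a b c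
      if (PySem.Dict.get? t v).isNone then
        PySem.Dict.insert t v ("4 " ++ a ++ " 4 " ++ b ++ " 4 " ++ c ++ " 4")
      else t) t) t) (PySem.Dict.empty : PySem.Dict Int String)

def tryAllFours_alt (sumToFind : Int) : Option String :=
  PySem.Dict.get? pvTable sumToFind

-- ===== PRECONDITION & SPEC =====
def Spec_tryAllFours (sumToFind : Int) (out : Option String) : Prop := out = tryAllFours_alt sumToFind
instance (sumToFind : Int) (out : Option String) : Decidable (Spec_tryAllFours sumToFind out) := by unfold Spec_tryAllFours; infer_instance

-- ===== CLAIM (what is proved, stated in full; the proofs are below) =====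
def Claim_equal_tryAllFours : Prop := ∀ (sumToFind : Int), Dom_tryAllFours sumToFind → Spec_tryAllFours sumToFind (tryAllFours sumToFind)

-- ===== LEMMAS AND PROOFS =====

-- first-match lookup in a list of (value, expression) pairs: the shape both sides reduce to.
def pvFm (s : Int) : List (Int × String) → Option String
  | [] => none
  | p :: rest => if s = p.1 then some p.2 else pvFm s rest

theorem pvFm_append (s : Int) (l1 l2 : List (Int × String)) :
    pvFm s (l1 ++ l2) = (pvFm s l1).or (pvFm s l2) := by
  induction l1 with
  | nil => simp [pvFm]
  | cons p t ih => by_cases h : s = p.1 <;> simp [pvFm, h, ih]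

theorem pvFindSome_ite {α : Type} (s : Int) (key : α → Int) (out : α → String) (l : List α) :
    (l.findSome? fun x => if s = key x then some (out x) else none)
      = pvFm s (l.map fun x => (key x, out x)) := by
  induction l with
  | nil => rfl
  | cons a t ih =>
    simp only [List.findSome?_cons, List.map_cons, pvFm]
    by_cases h : s = key a <;> simp [h, ih]

theorem pvFindSome_fm {α : Type} (s : Int) (L : α → List (Int × String)) (l : List α) :
    (l.findSome? fun x => pvFm s (L x)) = pvFm s (l.flatMap L) := by
  induction l with
  | nil => rfl
  | cons a t ih =>
    simp only [List.findSome?_cons, List.flatMap_cons, pvFm_append]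
    cases h : pvFm s (L a) with
    | none => simp [ih]
    | some v => simp

-- A's 64 combos, in A's iteration order, as (value, expression) pairs.
def pvPairsA : List (Int × String) :=
  ["+", "-", "*", "/"].flatMap fun f =>
    ["+", "-", "*", "/"].flatMap fun sc =>
      ["+", "-", "*", "/"].map fun t =>
        (expressionParsing ("4 " ++ f ++ " 4 " ++ sc ++ " 4 " ++ t ++ " 4"),
         "4 " ++ f ++ " 4 " ++ sc ++ " 4 " ++ t ++ " 4")

theorem pvA_eq_fm (s : Int) : tryAllFours s = pvFm s pvPairsA := by
  simp only [tryAllFours, pvPairsA, pvFindSome_ite, pvFindSome_fm]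

-- the two closed tables, evaluated once by the kernel
set_option maxRecDepth 10000 in
theorem pvPairsA_lit : pvPairsA = [(16, "4 + 4 + 4 + 4"), (8, "4 + 4 + 4 - 4"), (24, "4 + 4 + 4 * 4"), (9, "4 + 4 + 4 / 4"), (8, "4 + 4 - 4 + 4"), (0, "4 + 4 - 4 - 4"), (-8, "4 + 4 - 4 * 4"), (7, "4 + 4 - 4 / 4"), (24, "4 + 4 * 4 + 4"), (16, "4 + 4 * 4 - 4"), (68, "4 + 4 * 4 * 4"), (8, "4 + 4 * 4 / 4"), (9, "4 + 4 / 4 + 4"), (1, "4 + 4 / 4 - 4"), (8, "4 + 4 / 4 * 4"), (4, "4 + 4 / 4 / 4"), (8, "4 - 4 + 4 + 4"), (0, "4 - 4 + 4 - 4"), (16, "4 - 4 + 4 * 4"), (1, "4 - 4 + 4 / 4"), (0, "4 - 4 - 4 + 4"), (-8, "4 - 4 - 4 - 4"), (-16, "4 - 4 - 4 * 4"), (-1, "4 - 4 - 4 / 4"), (-8, "4 - 4 * 4 + 4"), (-16, "4 - 4 * 4 - 4"), (-60, "4 - 4 * 4 * 4"), (0, "4 - 4 * 4 / 4"), (7,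 "4 - 4 / 4 + 4"), (-1, "4 - 4 / 4 - 4"), (0, "4 - 4 / 4 * 4"), (4, "4 - 4 / 4 / 4"), (24, "4 * 4 + 4 + 4"), (16, "4 * 4 + 4 - 4"), (32, "4 * 4 + 4 * 4"), (17, "4 * 4 + 4 / 4"), (16, "4 * 4 - 4 + 4"), (8, "4 * 4 - 4 - 4"), (0, "4 * 4 - 4 * 4"), (15, "4 * 4 - 4 / 4"), (68, "4 * 4 * 4 + 4"), (60, "4 * 4 * 4 - 4"), (256, "4 * 4 * 4 * 4"), (16, "4 * 4 * 4 / 4"), (8, "4 * 4 / 4 + 4"), (0, "4 * 4 / 4 - 4"), (16, "4 * 4 / 4 * 4"), (1, "4 * 4 / 4 / 4"), (9, "4 / 4 + 4 + 4"), (1, "4 / 4 + 4 - 4"), (17, "4 / 4 + 4 * 4"), (2, "4 / 4 + 4 / 4"), (1, "4 / 4 - 4 + 4"), (-7, "4 / 4 - 4 - 4"), (-15, "4 / 4 - 4 * 4"), (0, "4 / 4 - 4 / 4"), (8, "4 / 4 * 4 + 4"), (0, "4 / 4 * 4 - 4"), (16, "4 / 4 * 4 * 4"), (1, "4 / 4 *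 4 / 4"), (4, "4 / 4 / 4 + 4"), (-4, "4 / 4 / 4 - 4"), (0, "4 / 4 / 4 * 4"), (0, "4 / 4 / 4 / 4")] := by decide

set_option maxRecDepth 10000 in
theorem pvTable_lit : pvTable = PySem.Dict.mk [(16, "4 + 4 + 4 + 4"), (8, "4 + 4 + 4 - 4"), (24, "4 + 4 + 4 * 4"), (9, "4 + 4 + 4 / 4"), (0, "4 + 4 - 4 - 4"), (-8, "4 + 4 - 4 * 4"), (7, "4 + 4 - 4 / 4"), (68, "4 + 4 * 4 * 4"), (1, "4 + 4 / 4 - 4"), (4, "4 + 4 / 4 / 4"), (-16, "4 - 4 - 4 * 4"), (-1, "4 - 4 - 4 / 4"), (-60, "4 - 4 * 4 * 4"), (32, "4 * 4 + 4 * 4"), (17, "4 * 4 + 4 / 4"), (15, "4 * 4 - 4 / 4"), (60, "4 * 4 * 4 - 4"), (256, "4 * 4 * 4 * 4"), (2, "4 / 4 + 4 / 4"), (-7, "4 / 4 - 4 - 4"), (-15, "4 / 4 - 4 * 4"), (-4, "4 / 4 / 4 - 4")] := by decide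

-- ===== VERDICT (by name: the statement is the Claim_ definition above) =====
set_option maxRecDepth 10000 in
theorem tryAllFours_spec : Claim_equal_tryAllFours := by
  intro s _
  show tryAllFours s = tryAllFours_alt s
  rw [pvA_eq_fm, pvPairsA_lit, tryAllFours_alt, pvTable_lit]
  by_cases h1 : s = 16;  · subst h1; decide
  by_cases h2 : s = 8;   · subst h2; decide
  by_cases h3 : s = 24;  · subst h3; decide
  by_cases h4 : s = 9;   · subst h4; decide
  by_cases h5 : s = 0;   · subst h5; decide
  by_cases h6 : s = -8;  · subst h6; decide
  by_cases h7 : s = 7;   · subst h7; decide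
  by_cases h8 : s = 68;  · subst h8; decide
  by_cases h9 : s = 1;   · subst h9; decide
  by_cases h10 : s = 4;  · subst h10; decide
  by_cases h11 : s = -16; · subst h11; decide
  by_cases h12 : s = -1; · subst h12; decide
  by_cases h13 : s = -60; · subst h13; decide
  by_cases h14 : s = 32; · subst h14; decide
  by_cases h15 : s = 17; · subst h15; decide
  by_cases h16 : s = 15; · subst h16; decide
  by_cases h17 : s = 60; · subst h17; decide
  by_cases h18 : s = 256; · subst h18; decide
  by_cases h19 : s = 2;  · subst h19; decide
  by_cases h20 : s = -7; · subst h20; decide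
  by_cases h21 : s = -15; · subst h21; decide
  by_cases h22 : s = -4; · subst h22; decide
  simp [pvFm, PySem.Dict.get?, h1, h2, h3, h4, h5, h6, h7, h8, h9,
    h10, h11, h12, h13, h14, h15, h16, h17, h18, h19, h20, h21, h22]
  omega
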